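-- pv_equiv track=rewrite | github.com/rodrigoschardong/Digital-Image-Processing | Transforms/Hough_Class.py | FilterCircleCenters
-- ===== SOURCE A (Python) =====
-- def FilterCircleCenters(centersCount, threshold):
--     filteredCenters = []
--     for c in centersCount[:]:
--         if(c[2] > threshold):
--             filteredCenters.append([c[0], c[1]])
--     #Erasing same centers
--     #https://www.codespeedy.com/remove-duplicate-elements-from-a-tuple-in-python/
--     b=set()
--     centers=[element for element in filteredCenters
--         if not (tuple(element) in b
--             or  b.add(tuple(element)))]
--     return centers
-- ===== SOURCE B (Python) =====
-- def FilterCircleCenters(centersCount, threshold):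
--     # worklist algorithm, no seen-set: repeatedly take the first qualifying center,
--     # emit it, and drop every later entry sharing its (x, y) key from the worklist
--     centers = []
--     lst = centersCount
--     while lst:
--         c, rest = lst[0], lst[1:]
--         if c[2] <= threshold:
--             lst = rest
--         else:
--             centers.append([c[0], c[1]])
--             lst = [d for d in rest if (d[0], d[1]) != (c[0], c[1])]
--     return centers
-- ===== Notes on version B (the rewrite author's own statement) =====
-- stated objective: alternative
-- what changed: Replaces A's two-stage seen-set dedup (filter pass, then a set-side-effect comprehension) with a worklist algorithm that keeps no auxiliary set: each step emits the first qualifying center and drops all later entries sharing its (x,y) key from the remaining worklist.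
import Mathlib
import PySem

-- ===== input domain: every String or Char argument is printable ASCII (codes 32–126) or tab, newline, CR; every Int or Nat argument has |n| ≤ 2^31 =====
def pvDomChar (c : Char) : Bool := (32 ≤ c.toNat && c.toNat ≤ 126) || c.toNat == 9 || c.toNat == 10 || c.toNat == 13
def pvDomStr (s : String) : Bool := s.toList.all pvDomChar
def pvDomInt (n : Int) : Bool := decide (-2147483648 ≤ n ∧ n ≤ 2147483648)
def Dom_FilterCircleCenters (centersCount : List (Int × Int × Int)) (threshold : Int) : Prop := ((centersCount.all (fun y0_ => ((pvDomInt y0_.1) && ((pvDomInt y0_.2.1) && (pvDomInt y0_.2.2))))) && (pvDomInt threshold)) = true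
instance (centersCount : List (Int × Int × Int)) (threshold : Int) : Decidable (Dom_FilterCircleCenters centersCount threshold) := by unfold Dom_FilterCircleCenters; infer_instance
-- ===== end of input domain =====

-- B replaces A's seen-set dedup with a worklist algorithm: emit the first qualifying center,
-- drop its (x, y) key from the remaining worklist, repeat; objective: alternative.
-- ===== PORT A =====
-- centersCount[:] is a shallow copy; iterating the copy is iterating centersCount itself.
-- tuple(element) is keyed by the element's value, so the set key is modelled by the 2-list itself
-- (tuple equality on (x, y) coincides with list equality on [x, y]).
def FilterCircleCenters (centersCount : List (Int × Int × Int)) (threshold : Int) : List (List Int) :=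
  let filteredCenters : List (List Int) :=
    centersCount.foldl
      (fun acc c => if c.2.2 > threshold then acc ++ [[c.1, c.2.1]] else acc) []
  -- b = set(); centers = [e for e in filteredCenters if not (tuple(e) in b or b.add(tuple(e)))]
  let st : PySem.Set (List Int) × List (List Int) :=
    filteredCenters.foldl
      (fun st e =>
        if PySem.Set.contains st.1 e then st
        else (PySem.Set.add st.1 e, st.2 ++ [e]))
      (PySem.Set.empty, [])
  st.2

-- ===== PORT B =====
-- Source B's while-loop over the shrinking worklist 'lst', as structural recursion on that list
-- (the emitted centers are produced front-to-back, exactly as the loop appends them).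
def pvGo (threshold : Int) : List (Int × Int × Int) → List (List Int)
  | [] => []
  | c :: rest =>
    if c.2.2 ≤ threshold then pvGo threshold rest
    else [c.1, c.2.1] :: pvGo threshold (rest.filter (fun d => !((d.1, d.2.1) == (c.1, c.2.1))))
termination_by l => l.length
decreasing_by
  all_goals simp only [List.length_cons]
  · omega
  · exact Nat.lt_succ_of_le (le_trans (by simpa using List.length_filter_le _ rest.attach) (by simp))

def FilterCircleCenters_alt (centersCount : List (Int × Int × Int)) (threshold : Int) : List (List Int) :=
  pvGo threshold centersCount

-- ===== PRECONDITION & SPEC =====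
def Spec_FilterCircleCenters (centersCount : List (Int × Int × Int)) (threshold : Int) (out : List (List Int)) : Prop := out = FilterCircleCenters_alt centersCount threshold
instance (centersCount : List (Int × Int × Int)) (threshold : Int) (out : List (List Int)) : Decidable (Spec_FilterCircleCenters centersCount threshold out) := by unfold Spec_FilterCircleCenters; infer_instance

-- ===== CLAIM (what is proved, stated in full; the proofs are below) =====
def Claim_equal_FilterCircleCenters : Prop := ∀ (centersCount : List (Int × Int × Int)) (threshold : Int), Dom_FilterCircleCenters centersCount threshold → Spec_FilterCircleCenters centersCount threshold (FilterCircleCenters centersCount threshold)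

-- ===== LEMMAS AND PROOFS =====

-- the tuple key (x, y) of a center, seen as A's list key [x, y]
def pvGKey (p : Int × Int) : List Int := [p.1, p.2]

theorem pvGKey_injective : Function.Injective pvGKey := by
  intro a b h
  simp only [pvGKey, List.cons.injEq, and_true] at h
  exact Prod.ext h.1 h.2

theorem pvContains_map (s : PySem.Set (Int × Int)) (k : Int × Int) :
    PySem.Set.contains (s.map pvGKey) (pvGKey k) = PySem.Set.contains s k := by
  rw [Bool.eq_iff_iff]
  simp [List.mem_map, pvGKey_injective.eq_iff]

theorem pvFilterPass (cc : List (Int × Int × Int)) (thr : Int) :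
    cc.foldl (fun acc c => if c.2.2 > thr then acc ++ [[c.1, c.2.1]] else acc) []
    = (cc.filter (fun c => decide (c.2.2 > thr))).map (fun c => [c.1, c.2.1]) := by
  simpa using PySem.List.foldl_append_if (l := cc) (p := fun c => decide (c.2.2 > thr))
    (f := fun c => [c.1, c.2.1]) (acc := [])

-- Fusion of A's two passes into a single fold over the triples, keyed by (x, y).
theorem pvFuse (l : List (Int × Int × Int)) (thr : Int)
    (s : PySem.Set (Int × Int)) (out : List (List Int)) :
    (((l.filter (fun c => decide (c.2.2 > thr))).map (fun c => [c.1, c.2.1])).foldl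
       (fun st e => if PySem.Set.contains st.1 e then st
                    else (PySem.Set.add st.1 e, st.2 ++ [e]))
       (s.map pvGKey, out)).2
    = (l.foldl
        (fun (st : PySem.Set (Int × Int) × List (List Int)) c =>
          if c.2.2 > thr then
            if PySem.Set.contains st.1 (c.1, c.2.1) then st
            else (PySem.Set.add st.1 (c.1, c.2.1), st.2 ++ [[c.1, c.2.1]])
          else st)
        (s, out)).2 := by
  induction l generalizing s out with
  | nil => rfl
  | cons c l ih =>
    have hkey : ([c.1, c.2.1] : List Int) = pvGKey (c.1, c.2.1) := rfl
    rw [List.filter_cons, List.foldl_cons]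
    by_cases h : c.2.2 > thr
    · rw [if_pos (by simpa using h), if_pos h, List.map_cons, List.foldl_cons, hkey,
        pvContains_map]
      by_cases hc : PySem.Set.contains s (c.1, c.2.1) = true
      · rw [if_pos hc, if_pos hc]
        exact ih s out
      · have hadd : PySem.Set.add (s.map pvGKey) (pvGKey (c.1, c.2.1))
            = (PySem.Set.add s (c.1, c.2.1)).map pvGKey := by
          unfold PySem.Set.add
          rw [pvContains_map, if_neg hc, if_neg hc, List.map_append]
          rfl
        rw [if_neg hc, if_neg hc, hadd]
        exact ih _ _
    · rw [if_neg (by simpa using h), if_neg h]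
      exact ih s out

-- The fused fold with seen-set s equals pvGo on the list with seen keys removed, appended to out.
theorem pvFoldGo (thr : Int) (l : List (Int × Int × Int))
    (s : PySem.Set (Int × Int)) (out : List (List Int)) :
    (l.foldl
        (fun (st : PySem.Set (Int × Int) × List (List Int)) c =>
          if c.2.2 > thr then
            if PySem.Set.contains st.1 (c.1, c.2.1) then st
            else (PySem.Set.add st.1 (c.1, c.2.1), st.2 ++ [[c.1, c.2.1]])
          else st)
        (s, out)).2
    = out ++ pvGo thr (l.filter (fun c => !(PySem.Set.contains s (c.1, c.2.1)))) := by
  induction l generalizing s out with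
  | nil => simp [pvGo]
  | cons c l ih =>
    simp only [List.foldl_cons, List.filter_cons]
    by_cases h : c.2.2 > thr
    · by_cases hc : PySem.Set.contains s (c.1, c.2.1) = true
      · -- skipped by both sides
        rw [if_pos h, if_pos hc, hc]
        simpa using ih s out
      · -- emitted: pvGo unfolds, and filtering by (add s k) = filtering by s then by ≠ k
        have hcf : PySem.Set.contains s (c.1, c.2.1) = false := by simpa using hc
        have hfilter :
            l.filter (fun c' => !(PySem.Set.contains (PySem.Set.add s (c.1, c.2.1)) (c'.1, c'.2.1)))
            = (l.filter (fun c' => !(PySem.Set.contains s (c'.1, c'.2.1)))).filter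
                (fun d => !((d.1, d.2.1) == (c.1, c.2.1))) := by
          rw [List.filter_filter]
          apply List.filter_congr
          intro x _
          rw [Bool.eq_iff_iff]
          simp [PySem.Set.mem_add, Prod.ext_iff, Bool.and_comm]
          tauto
        rw [if_pos h, if_neg hc, hcf]
        simp only [Bool.not_false, if_pos]
        rw [ih, hfilter, pvGo, if_neg (not_le.2 h)]
        simp
    · -- below threshold: both sides skip (pvGo skips the head)
      have hle : c.2.2 ≤ thr := not_lt.1 h
      rw [if_neg h]
      by_cases hc : PySem.Set.contains s (c.1, c.2.1) = true
      · rw [hc]; simpa using ih s out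
      · have hcf : PySem.Set.contains s (c.1, c.2.1) = false := by simpa using hc
        rw [hcf]
        simp only [Bool.not_false, if_pos]
        rw [ih, pvGo, if_pos hle]

-- ===== VERDICT (by name: the statement is the Claim_ definition above) =====
theorem FilterCircleCenters_spec : Claim_equal_FilterCircleCenters := by
  intro cc thr _
  unfold Spec_FilterCircleCenters FilterCircleCenters FilterCircleCenters_alt
  simp only [pvFilterPass]
  have hfuse := pvFuse cc thr PySem.Set.empty []
  simp only [PySem.Set.empty, List.map_nil] at hfuse
  simp only [PySem.Set.empty]
  rw [hfuse, pvFoldGo]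
  simp [PySem.Set.contains]
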